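-- pv_equiv track=rewrite | github.com/terrapower/armi | armi/physics/fuelCycle/repeatShuffleFunctions.py | _forwardSearch
-- ===== SOURCE A (Python) =====
-- def _forwardSearch(value, fromLoc, toLoc, initialValue):
--     if value in fromLoc:
--         index = fromLoc.index(value)
--         if initialValue == toLoc[index]:
--             chain = [value]
--         else:
--             chain = _forwardSearch(toLoc[index], fromLoc, toLoc, initialValue)
--             chain.append(value)
--     else:
--         chain = [value]
--
--     return chain
-- ===== SOURCE B (Python) =====
-- def _forwardSearch(value, fromLoc, toLoc, initialValue):
--     nxt = {}
--     for f, t in zip(fromLoc, toLoc):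
--         nxt.setdefault(f, t)
--     chain = [value]
--     while value in nxt and nxt[value] != initialValue:
--         value = nxt[value]
--         chain = [value] + chain
--     return chain
-- ===== Notes on version B (the rewrite author's own statement) =====
-- stated objective: alternative
-- what changed: Replaced the recursion with its repeated fromLoc.index scans by a successor dictionary built once from zip(fromLoc, toLoc) (setdefault keeps the first occurrence, matching .index), walked iteratively while prepending each new link, so no recursion, no index arithmetic and no final reverse.
import Mathlib
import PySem

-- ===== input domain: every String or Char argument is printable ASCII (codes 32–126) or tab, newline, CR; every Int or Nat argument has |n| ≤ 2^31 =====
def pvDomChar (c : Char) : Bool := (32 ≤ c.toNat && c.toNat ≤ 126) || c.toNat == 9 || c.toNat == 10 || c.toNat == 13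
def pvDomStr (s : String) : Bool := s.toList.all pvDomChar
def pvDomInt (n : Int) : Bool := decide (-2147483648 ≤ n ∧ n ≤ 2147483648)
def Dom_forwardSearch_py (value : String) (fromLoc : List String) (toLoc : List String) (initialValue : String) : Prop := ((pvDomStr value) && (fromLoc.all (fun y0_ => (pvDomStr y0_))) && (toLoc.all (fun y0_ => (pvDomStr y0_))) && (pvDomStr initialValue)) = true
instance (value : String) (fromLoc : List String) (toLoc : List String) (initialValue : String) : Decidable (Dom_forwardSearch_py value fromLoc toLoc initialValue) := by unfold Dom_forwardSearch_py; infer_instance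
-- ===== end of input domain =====

-- B replaces A's recursion (with its repeated fromLoc.index scans) by a successor dictionary
-- built once from zip(fromLoc, toLoc) and an iterative walk that prepends each link (alternative).
-- Equivalence of the RETURN values on all inputs where Python A terminates without exception (Pre_ below).

-- ===== PORT A =====
-- A's recursion is not structurally decreasing (the location data may be cyclic, where Python A
-- raises RecursionError); the fuel |fromLoc|+1 makes the port total and is never exhausted on
-- inputs satisfying Pre_ (the chain visits pairwise-distinct members of fromLoc).
def fsA (fuel : Nat) (value : String) (fromLoc : List String) (toLoc : List String) (initialValue : String) : List String :=
  match fuel with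
  | 0 => [value]            -- fuel exhaustion: unreachable under Pre_
  | n+1 =>
    match fromLoc.idxOf? value with                    -- value in fromLoc / fromLoc.index(value)
    | none => [value]
    | some i =>
      match toLoc[i]? with
      | none => [value]     -- Python: IndexError, excluded by Pre_
      | some t =>
        if initialValue = t then [value]
        else fsA n t fromLoc toLoc initialValue ++ [value]   -- recurse, then chain.append(value)

def forwardSearch_py (value : String) (fromLoc : List String) (toLoc : List String) (initialValue : String) : List String :=
  fsA (fromLoc.length + 1) value fromLoc toLoc initialValue

-- ===== PORT B =====
-- nxt = {}; for f, t in zip(fromLoc, toLoc): nxt.setdefault(f, t)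
def fsNext (fromLoc toLoc : List String) : PySem.Dict String String :=
  (fromLoc.zip toLoc).foldl (fun d p => d.setdefault p.1 p.2) PySem.Dict.empty

-- the while-loop of Source B as fuel recursion: chain = [value] + chain each step; same fuel remark as for A
def fsBwalk (fuel : Nat) (nxt : PySem.Dict String String) (initialValue : String) (value : String) (chain : List String) : List String :=
  match fuel with
  | 0 => chain              -- fuel exhaustion: unreachable under Pre_ (Python B would loop forever)
  | n+1 =>
    match nxt.get? value with                          -- while value in nxt
    | none => chain
    | some t =>
      if t = initialValue then chain                   -- and nxt[value] != initialValue
      else fsBwalk n nxt initialValue t (t :: chain)   -- value = nxt[value]; chain = [value] + chain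

def forwardSearch_py_alt (value : String) (fromLoc : List String) (toLoc : List String) (initialValue : String) : List String :=
  fsBwalk (fromLoc.length + 1) (fsNext fromLoc toLoc) initialValue value [value]

-- ===== PRECONDITION & SPEC =====
-- one step of the value chain (identity where the Python chain stops or raises)
def pvStep (fromLoc toLoc : List String) (x : String) : String :=
  match fromLoc.idxOf? x with
  | none => x
  | some i => (toLoc[i]?).getD x

-- the chain may continue from x (found, index in range, target ≠ initialValue)
def pvCont (fromLoc toLoc : List String) (initialValue x : String) : Bool :=
  match fromLoc.idxOf? x with
  | none => false
  | some i => match toLoc[i]? with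
    | none => false
    | some t => initialValue != t

-- the chain stops normally at x (not found, or found with in-range target = initialValue)
def pvStop (fromLoc toLoc : List String) (initialValue x : String) : Bool :=
  match fromLoc.idxOf? x with
  | none => true
  | some i => match toLoc[i]? with
    | none => false
    | some t => initialValue == t

-- Pre_ = exactly the inputs where Python A returns: the pointer chain from value reaches a normal
-- stop within |fromLoc| steps with every intermediate index in range (otherwise A raises
-- RecursionError on a cycle or IndexError on an out-of-range index, and B loops forever or
-- treats the out-of-range link as absent).
def Pre_forwardSearch_py (value : String) (fromLoc : List String) (toLoc : List String) (initialValue : String) : Prop :=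
  ∃ k < fromLoc.length + 1,
    (∀ j < k, pvCont fromLoc toLoc initialValue ((pvStep fromLoc toLoc)^[j] value) = true) ∧
    pvStop fromLoc toLoc initialValue ((pvStep fromLoc toLoc)^[k] value) = true
instance (value : String) (fromLoc : List String) (toLoc : List String) (initialValue : String) : Decidable (Pre_forwardSearch_py value fromLoc toLoc initialValue) := by unfold Pre_forwardSearch_py; infer_instance

def pvWitness_forwardSearch_py : String × List String × List String × String := ("a", ["a"], ["b"], "b")

def Spec_forwardSearch_py (value : String) (fromLoc : List String) (toLoc : List String) (initialValue : String) (out : List String) : Prop := out = forwardSearch_py_alt value fromLoc toLoc initialValue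
instance (value : String) (fromLoc : List String) (toLoc : List String) (initialValue : String) (out : List String) : Decidable (Spec_forwardSearch_py value fromLoc toLoc initialValue out) := by unfold Spec_forwardSearch_py; infer_instance

-- ===== CLAIM (what is proved, stated in full; the proofs are below) =====
def Claim_equal_forwardSearch_py : Prop := ∀ (value : String) (fromLoc : List String) (toLoc : List String) (initialValue : String), Dom_forwardSearch_py value fromLoc toLoc initialValue → Pre_forwardSearch_py value fromLoc toLoc initialValue → Spec_forwardSearch_py value fromLoc toLoc initialValue (forwardSearch_py value fromLoc toLoc initialValue)

-- ===== LEMMAS AND PROOFS =====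
-- the setdefault fold keeps the first binding of each key: lookup is the first matching zip pair
theorem foldl_setdefault_get? (l : List (String × String)) (d : PySem.Dict String String) (x : String) :
    (l.foldl (fun d p => d.setdefault p.1 p.2) d).get? x =
      ((d.get? x).orElse (fun _ => (l.find? (fun p => p.1 == x)).map (·.2))) := by
  induction l generalizing d with
  | nil => simp
  | cons p l ih =>
    simp only [List.foldl_cons, ih, List.find?_cons]
    by_cases hx : p.1 = x
    · subst hx
      rw [PySem.Dict.get?_setdefault_self]
      cases h : d.get? p.1 <;> simp
    · have hget : (d.setdefault p.1 p.2).get? x = d.get? x := by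
        cases h : d.contains p.1
        · rw [PySem.Dict.setdefault_of_not_contains _ _ h,
            PySem.Dict.get?_insert_of_ne _ _ (show x ≠ p.1 from fun he => hx he.symm)]
        · rw [PySem.Dict.setdefault_of_contains _ _ h]
      rw [hget]
      simp [show (p.1 == x) = false from beq_eq_false_iff_ne.mpr hx]

-- the first matching zip pair is toLoc at fromLoc's first index of x
theorem find?_zip_eq (fromLoc toLoc : List String) (x : String) :
    ((fromLoc.zip toLoc).find? (fun p => p.1 == x)).map (·.2) =
      (fromLoc.idxOf? x).bind (fun i => toLoc[i]?) := by
  induction fromLoc generalizing toLoc with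
  | nil => simp [List.idxOf?]
  | cons f fs ih =>
    cases toLoc with
    | nil =>
      simp only [List.zip_nil_right, List.find?_nil, Option.map_none]
      cases h : (f :: fs).idxOf? x <;> simp
    | cons t ts =>
      by_cases hx : f = x
      · subst hx
        simp [List.idxOf?_cons]
      · have hb : (f == x) = false := beq_eq_false_iff_ne.mpr hx
        simp only [List.zip_cons_cons, List.find?_cons, hb, List.idxOf?_cons]
        rw [ih ts]
        cases h : fs.idxOf? x <;> simp

-- the dict lookup equals A's fromLoc.index followed by toLoc[index]
theorem fsNext_get? (fromLoc toLoc : List String) (x : String) :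
    (fsNext fromLoc toLoc).get? x = (fromLoc.idxOf? x).bind (fun i => toLoc[i]?) := by
  unfold fsNext
  rw [foldl_setdefault_get?, ← find?_zip_eq]
  simp [Option.orElse]

-- B's walk with the prepend accumulator equals A's recursion appended to the accumulator
theorem fsBwalk_eq_fsA (fromLoc toLoc : List String) (initialValue : String) :
    ∀ (fuel : Nat) (value : String) (acc : List String),
      fsBwalk fuel (fsNext fromLoc toLoc) initialValue value (value :: acc) =
        fsA fuel value fromLoc toLoc initialValue ++ acc := by
  intro fuel
  induction fuel with
  | zero => intro value acc; simp [fsBwalk, fsA]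
  | succ n ih =>
    intro value acc
    simp only [fsBwalk, fsA, fsNext_get?]
    cases h : fromLoc.idxOf? value with
    | none => simp
    | some i =>
      simp only [Option.bind_some]
      cases ht : toLoc[i]? with
      | none => simp
      | some t =>
        by_cases hi : initialValue = t
        · simp [hi]
        · have hi' : ¬ t = initialValue := fun he => hi he.symm
          simp [hi, hi', ih t (value :: acc)]

theorem pvWitness_ok : Dom_forwardSearch_py (pvWitness_forwardSearch_py.1) (pvWitness_forwardSearch_py.2.1) (pvWitness_forwardSearch_py.2.2.1) (pvWitness_forwardSearch_py.2.2.2) ∧ Pre_forwardSearch_py (pvWitness_forwardSearch_py.1) (pvWitness_forwardSearch_py.2.1) (pvWitness_forwardSearch_py.2.2.1) (pvWitness_forwardSearch_py.2.2.2) := by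
  decide

-- ===== VERDICT (by name: the statement is the Claim_ definition above) =====
theorem forwardSearch_py_spec : Claim_equal_forwardSearch_py := by
  intro value fromLoc toLoc initialValue _ _
  unfold Spec_forwardSearch_py forwardSearch_py forwardSearch_py_alt
  rw [fsBwalk_eq_fsA fromLoc toLoc initialValue (fromLoc.length + 1) value []]
  simp
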